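-- pv_equiv track=rewrite | github.com/russellfenn/AoC | 2020/d06.py | parse_input_anyone
-- ===== SOURCE A (Python) =====
-- from typing import List, Set
--
-- def parse_input_anyone(data: List[str]) -> List[Set[str]]:
--     """Put the letters into a Set to eliminate duplicates."""
--     groups: List[Set[str]] = list()
--     # Each group is separated by a blank line
--     s: Set[str] = set()
--     for line in data:
--         if len(line) == 0:
--             groups.append(s)
--             s = set()
--         else:
--             s.update(list(line))
--     if s:  # include any left over
--         groups.append(s)
--     return groups
-- ===== SOURCE B (Python) =====
-- from typing import List, Set
--
--
-- def parse_input_anyone(data: List[str]) -> List[Set[str]]: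
--     """Recursive divide-at-delimiter: split off the segment before the first
--     blank line, set-ify it, and recurse on the remainder."""
--     if "" in data:
--         i = data.index("")
--         head = set(c for line in data[:i] for c in line)
--         return [head] + parse_input_anyone(data[i + 1:])
--     tail = set(c for line in data for c in line)
--     return [tail] if tail else []
-- ===== Notes on version B (the rewrite author's own statement) =====
-- stated objective: alternative
-- what changed: A is a single iterative scan that mutates a running set and flushes it on each blank line; B is a recursive divide-at-delimiter algorithm that locates the first blank line with index, set-ifies the slice before it, and recurses on the slice after it, with a non-recursive base case for delimiter-free input.
import Mathlib
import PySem

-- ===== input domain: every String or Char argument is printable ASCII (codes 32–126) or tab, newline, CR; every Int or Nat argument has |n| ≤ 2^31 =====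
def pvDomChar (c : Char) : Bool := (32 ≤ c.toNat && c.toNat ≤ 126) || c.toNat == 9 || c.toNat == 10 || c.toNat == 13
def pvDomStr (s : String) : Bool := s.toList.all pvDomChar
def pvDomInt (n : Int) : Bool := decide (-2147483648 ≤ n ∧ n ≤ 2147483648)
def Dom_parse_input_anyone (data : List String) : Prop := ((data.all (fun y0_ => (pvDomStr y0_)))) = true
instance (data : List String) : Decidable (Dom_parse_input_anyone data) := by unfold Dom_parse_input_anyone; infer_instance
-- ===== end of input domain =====

-- B replaces A's single iterative scan (mutating a running set, flushed on blank lines)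
-- by a recursive divide-at-delimiter algorithm: find the first blank line with index,
-- set-ify the slice before it, recurse on the slice after it (objective: alternative).

-- ===== PORT A =====
-- loop body of A: on a blank line flush the current set, otherwise s.update(list(line))
def pvStepA (acc : List (List String) × PySem.Set String) (line : String) :
    List (List String) × PySem.Set String :=
  if PySem.Str.len line == 0 then (acc.1 ++ [acc.2], PySem.Set.empty)
  else (acc.1, PySem.Set.update acc.2 (line.toList.map (fun c => String.ofList [c])))

def parse_input_anyone (data : List String) : List (List String) :=
  let st := data.foldl pvStepA ([], PySem.Set.empty)
  if st.2.isEmpty then st.1 else st.1 ++ [st.2]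

-- ===== PORT B =====
-- set(c for line in seg for c in line): chars of the segment in order, deduplicated
def pvSegSet (seg : List String) : List String :=
  PySem.Set.ofList (seg.flatMap (fun l => l.toList.map (fun c => String.ofList [c])))

def parse_input_anyone_alt (data : List String) : List (List String) :=
  match h : PySem.List.index? data "" with
  | some i =>
      pvSegSet (PySem.List.slice data none (some (i : Int))) ::
        parse_input_anyone_alt (PySem.List.slice data (some ((i : Int) + 1)) none)
  | none =>
      let tail := pvSegSet data
      if tail = [] then [] else [tail]
termination_by data.length
decreasing_by
  obtain ⟨hk, -⟩ := PySem.List.getElem_of_index?_eq_some h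
  have e : ((i : Int) + 1) = ((i + 1 : Nat) : Int) := by push_cast; ring
  rw [e, PySem.List.slice_from_natCast]
  simp only [List.length_drop]
  omega

-- ===== PRECONDITION & SPEC =====
def Spec_parse_input_anyone (data : List String) (out : List (List String)) : Prop := out = parse_input_anyone_alt data
instance (data : List String) (out : List (List String)) : Decidable (Spec_parse_input_anyone data out) := by unfold Spec_parse_input_anyone; infer_instance

-- ===== CLAIM (what is proved, stated in full; the proofs are below) =====
def Claim_equal_parse_input_anyone : Prop := ∀ (data : List String), Dom_parse_input_anyone data → Spec_parse_input_anyone data (parse_input_anyone data)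

-- ===== LEMMAS AND PROOFS =====

lemma pvLen_eq_zero (l : String) : (PySem.Str.len l == 0) = (l == "") := by
  simp [PySem.Str.len]

-- folding A's step over a blank-free segment only updates the running set
lemma pvFold_noBlank (seg : List String) (gs : List (List String)) (s : PySem.Set String)
    (h : "" ∉ seg) :
    seg.foldl pvStepA (gs, s) =
      (gs, PySem.Set.update s (seg.flatMap (fun l => l.toList.map (fun c => String.ofList [c])))) := by
  induction seg generalizing s with
  | nil => simp [PySem.Set.update]
  | cons l rest ih =>
    have hl : l ≠ "" := by intro he; exact h (by simp [he])
    have hb : (PySem.Str.len l == 0) = false := by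
      rw [pvLen_eq_zero]; simpa using hl
    have hm : "" ∉ rest := by intro hm; exact h (by simp [hm])
    simp only [List.foldl_cons, pvStepA, hb, Bool.false_eq_true, if_false]
    rw [ih _ hm]
    simp [PySem.Set.update, List.foldl_append, List.flatMap_cons]

lemma pvSegSet_eq_nil (seg : List String) (h : "" ∉ seg) :
    (pvSegSet seg = []) ↔ seg = [] := by
  cases seg with
  | nil => simp [pvSegSet, PySem.Set.ofList]
  | cons l rest =>
    have hl : l ≠ "" := by intro he; exact h (by simp [he])
    have hcl : l.toList ≠ [] := by
      intro he; exact hl ((String.toList_eq_nil_iff).mp he)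
    obtain ⟨c, cs, hc⟩ := List.exists_cons_of_ne_nil hcl
    constructor
    · intro hnil
      exfalso
      have hmem : String.ofList [c] ∈ pvSegSet (l :: rest) := by
        rw [pvSegSet, PySem.Set.mem_ofList]
        simp [hc]
      rw [hnil] at hmem
      exact (List.not_mem_nil) hmem
    · intro he; cases he

-- the main recursion/loop correspondence
lemma pvKey (data : List String) (gs : List (List String)) :
    (if (data.foldl pvStepA (gs, PySem.Set.empty)).2.isEmpty
       then (data.foldl pvStepA (gs, PySem.Set.empty)).1
       else (data.foldl pvStepA (gs, PySem.Set.empty)).1 ++ [(data.foldl pvStepA (gs, PySem.Set.empty)).2])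
      = gs ++ parse_input_anyone_alt data := by
  induction data using parse_input_anyone_alt.induct generalizing gs with
  | case1 data i h ih =>
    obtain ⟨pre, suf, hdata, hlen, hpre⟩ := (PySem.List.index?_eq_some_iff data "" i).mp h
    have e1 : PySem.List.slice data none (some (i : Int)) = pre := by
      rw [PySem.List.slice_to_natCast, hdata, ← hlen]
      simp
    have e2 : PySem.List.slice data (some ((i : Int) + 1)) none = suf := by
      have e : ((i : Int) + 1) = ((i + 1 : Nat) : Int) := by push_cast; ring
      rw [e, PySem.List.slice_from_natCast, hdata, ← hlen]
      simp
    rw [parse_input_anyone_alt, h]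
    simp only [e1, e2]
    rw [hdata, List.foldl_append, pvFold_noBlank pre gs PySem.Set.empty hpre, List.foldl_cons]
    have hb : (PySem.Str.len ("" : String) == 0) = true := by rw [pvLen_eq_zero]; rfl
    simp only [pvStepA, hb, if_true]
    have hupd : PySem.Set.update PySem.Set.empty
        (pre.flatMap (fun l => l.toList.map (fun c => String.ofList [c]))) = pvSegSet pre := rfl
    rw [hupd]
    have ih' := ih (gs ++ [pvSegSet pre])
    rw [e2] at ih'
    rw [ih']
    simp
  | case2 data h =>
    have hnb : "" ∉ data := (PySem.List.index?_eq_none_iff data "").mp h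
    rw [parse_input_anyone_alt, h]
    rw [pvFold_noBlank data gs PySem.Set.empty hnb]
    have hupd : PySem.Set.update PySem.Set.empty
        (data.flatMap (fun l => l.toList.map (fun c => String.ofList [c]))) = pvSegSet data := rfl
    simp only [hupd]
    by_cases hd : data = []
    · subst hd; simp [pvSegSet, PySem.Set.ofList]
    · have h1 : pvSegSet data ≠ [] := by
        intro hx; exact hd ((pvSegSet_eq_nil data hnb).mp hx)
      simp [h1, List.isEmpty_iff]
  | case3 data h =>
    have hnb : "" ∉ data := (PySem.List.index?_eq_none_iff data "").mp h
    rw [parse_input_anyone_alt, h]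
    rw [pvFold_noBlank data gs PySem.Set.empty hnb]
    have hupd : PySem.Set.update PySem.Set.empty
        (data.flatMap (fun l => l.toList.map (fun c => String.ofList [c]))) = pvSegSet data := rfl
    simp only [hupd]
    by_cases hd : data = []
    · subst hd; simp [pvSegSet, PySem.Set.ofList]
    · have h1 : pvSegSet data ≠ [] := by
        intro hx; exact hd ((pvSegSet_eq_nil data hnb).mp hx)
      simp [h1, List.isEmpty_iff]

-- ===== VERDICT (by name: the statement is the Claim_ definition above) =====
theorem parse_input_anyone_spec : Claim_equal_parse_input_anyone := by
  intro data _
  unfold Spec_parse_input_anyone parse_input_anyone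
  simpa using pvKey data []
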